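-- pv_equiv track=rewrite | github.com/jessr92/advent-of-code-2024 | src/day7.py | solution_exists
-- ===== SOURCE A (Python) =====
-- def solution_exists(result: int, left_operand: int, other_operands: list[int], include_concatenation: bool) -> bool:
--     if len(other_operands) == 0:
--         return result == left_operand
--     if left_operand > result:
--         return False
--     right_operand = other_operands[0]
--     remainder = other_operands[1:]
--     addition: bool = solution_exists(result, left_operand + right_operand, remainder, include_concatenation)
--     multiplication: bool = solution_exists(result, left_operand * right_operand, remainder, include_concatenation)
--     concatenation: bool = solution_exists(result, int(f"{left_operand}{right_operand}"), remainder,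
--                                           include_concatenation) if include_concatenation else False
--     return addition or multiplication or concatenation
-- ===== SOURCE B (Python) =====
-- def solution_exists(result: int, left_operand: int, other_operands: list[int], include_concatenation: bool) -> bool:
--     # Breadth-first: keep the list of all reachable accumulator values per level.
--     frontier = [left_operand]
--     for r in other_operands:
--         nxt = []
--         for v in frontier:
--             if v <= result:
--                 nxt.append(v + r)
--                 nxt.append(v * r)
--                 if include_concatenation:
--                     nxt.append(int(f"{v}{r}"))
--         frontier = nxt
--     return result in frontier
-- ===== Notes on version B (the rewrite author's own statement) =====
-- stated objective: alternative
-- what changed: Replaces A's depth-first recursion over one accumulator with an iterative breadth-first loop that expands a frontier list of all reachable accumulator values per operand and checks membership of the target at the end.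
-- outside the precondition, e.g. on solution_exists(5, 10, [-1], True): A returns False, B returns False
import Mathlib
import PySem

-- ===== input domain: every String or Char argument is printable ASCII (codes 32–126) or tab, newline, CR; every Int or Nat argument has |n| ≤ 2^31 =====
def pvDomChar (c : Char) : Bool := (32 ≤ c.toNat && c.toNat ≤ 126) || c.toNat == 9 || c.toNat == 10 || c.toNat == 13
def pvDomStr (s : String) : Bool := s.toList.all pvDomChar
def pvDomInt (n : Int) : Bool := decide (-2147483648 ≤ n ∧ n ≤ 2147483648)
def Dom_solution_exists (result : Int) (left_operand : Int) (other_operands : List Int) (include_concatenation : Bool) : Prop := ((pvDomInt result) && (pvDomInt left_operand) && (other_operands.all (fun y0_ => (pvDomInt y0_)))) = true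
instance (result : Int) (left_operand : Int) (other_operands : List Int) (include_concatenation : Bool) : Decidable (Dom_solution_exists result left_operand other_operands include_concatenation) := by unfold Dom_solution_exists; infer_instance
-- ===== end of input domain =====

-- ===== PORT A =====
-- B changes nothing observable; it is an alternative breadth-first formulation of A's search (objective: alternative).
-- int(f"{l}{r}") of both Pythons (valid whenever r >= 0; under Pre_ the Option is always some)
def pvConcat (l r : Int) : Int :=
  (PySem.Int.ofStr? (PySem.Int.toStr l ++ PySem.Int.toStr r)).getD 0

def solution_exists (result : Int) (left_operand : Int) (other_operands : List Int) (include_concatenation : Bool) : Bool :=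
  match other_operands with
  | [] => result == left_operand
  | right_operand :: remainder =>
    if left_operand > result then false
    else
      let addition := solution_exists result (left_operand + right_operand) remainder include_concatenation
      let multiplication := solution_exists result (left_operand * right_operand) remainder include_concatenation
      let concatenation :=
        if include_concatenation then
          solution_exists result (pvConcat left_operand right_operand) remainder include_concatenation
        else false
      addition || multiplication || concatenation

-- ===== PORT B =====
-- one level of B's frontier expansion (the inner loop of Source B)
def pvStep (result : Int) (include_concatenation : Bool) (frontier : List Int) (r : Int) : List Int :=
  frontier.flatMap (fun v =>
    if v ≤ result then
      [v + r, v * r] ++ (if include_concatenation then [pvConcat v r] else [])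
    else [])

def solution_exists_alt (result : Int) (left_operand : Int) (other_operands : List Int) (include_concatenation : Bool) : Bool :=
  (other_operands.foldl (pvStep result include_concatenation) [left_operand]).contains result

-- ===== PRECONDITION & SPEC =====
-- Pre_ excludes inputs where include_concatenation is true and some operand is negative: on most of these A
-- raises ValueError (int("..-..")); on some A still returns False because its `left_operand > result` prune
-- cuts the search before the negative operand is reached — a closed-form Pre_ cannot separate those, and B
-- agrees with A on them anyway.
def Pre_solution_exists (result : Int) (left_operand : Int) (other_operands : List Int) (include_concatenation : Bool) : Prop :=
  include_concatenation = true → ∀ r ∈ other_operands, 0 ≤ r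
instance (result : Int) (left_operand : Int) (other_operands : List Int) (include_concatenation : Bool) : Decidable (Pre_solution_exists result left_operand other_operands include_concatenation) := by unfold Pre_solution_exists; infer_instance
def pvWitness_solution_exists : Int × Int × List Int × Bool := (10, 1, [2, 3], true)

def Spec_solution_exists (result : Int) (left_operand : Int) (other_operands : List Int) (include_concatenation : Bool) (out : Bool) : Prop := out = solution_exists_alt result left_operand other_operands include_concatenation
instance (result : Int) (left_operand : Int) (other_operands : List Int) (include_concatenation : Bool) (out : Bool) : Decidable (Spec_solution_exists result left_operand other_operands include_concatenation out) := by unfold Spec_solution_exists; infer_instance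

-- ===== CLAIM (what is proved, stated in full; the proofs are below) =====
def Claim_equal_solution_exists : Prop := ∀ (result : Int) (left_operand : Int) (other_operands : List Int) (include_concatenation : Bool), Dom_solution_exists result left_operand other_operands include_concatenation → Pre_solution_exists result left_operand other_operands include_concatenation → Spec_solution_exists result left_operand other_operands include_concatenation (solution_exists result left_operand other_operands include_concatenation)

-- ===== LEMMAS AND PROOFS =====
theorem pvContains_any (xs : List Int) (a : Int) : xs.contains a = xs.any (fun v => a == v) := by
  induction xs with
  | nil => rfl
  | cons x xs ih => simp only [List.contains_cons, List.any_cons, ih, beq_eq_decide]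

-- B's folded frontier contains the target iff some frontier value completes by A's recursion.
theorem pvFold_any (result : Int) (c : Bool) (ops : List Int) (vals : List Int) :
    (ops.foldl (pvStep result c) vals).contains result
      = vals.any (fun v => solution_exists result v ops c) := by
  induction ops generalizing vals with
  | nil =>
    simp only [List.foldl_nil, solution_exists]
    exact pvContains_any vals result
  | cons r rest ih =>
    rw [List.foldl_cons, ih]
    simp only [pvStep, List.any_flatMap, solution_exists]
    refine List.any_congr rfl (fun v => ?_)
    by_cases h : v ≤ result
    · have h2 : ¬ v > result := by omega
      simp only [h, h2, if_true, if_false, List.any_append, List.any_cons, List.any_nil,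
        Bool.or_false]
      cases c <;> simp [Bool.or_assoc]
    · have h2 : v > result := by omega
      simp [h, h2]

-- ===== VERDICT (by name: the statement is the Claim_ definition above) =====
theorem solution_exists_spec : Claim_equal_solution_exists := by
  intro result l ops c _ _
  unfold Spec_solution_exists solution_exists_alt
  rw [pvFold_any]
  simp
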